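-- pv_equiv track=rewrite | github.com/ufkapano/graphtheory | graphtheory/permutations/circletools.py | make_2tree_circle
-- ===== SOURCE A (Python) =====
-- def swap(L, i, j):
--     L[i], L[j] = L[j], L[i]
--
-- def make_2tree_circle(n):
--     """Return a 2-tree graph as double perm."""
--     if n < 2:
--         raise ValueError("n has to be greater than 1")
--     perm = [0, 1, 0, 1]
--     for i in range(2, n):
--         perm.extend((i, i))
--         swap(perm, -3, -2)
--         swap(perm, -4, -3)
--     return perm
-- ===== SOURCE B (Python) =====
-- def make_2tree_circle(n):
--     """Return a 2-tree graph as double perm."""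
--     if n < 2:
--         raise ValueError("n has to be greater than 1")
--     return [0, 1] + [x for k in range(1, n - 1) for x in (k + 1, k - 1)] + [n - 2, n - 1]
-- ===== Notes on version B (the rewrite author's own statement) =====
-- stated objective: simpler
-- what changed: B emits each pair of slots by a closed-form formula (pair k is [k+1, k-1] for the middle pairs, with fixed first and last pairs) in one comprehension, instead of A's incremental extend-and-double-swap mutation of a growing list.
import Mathlib
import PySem

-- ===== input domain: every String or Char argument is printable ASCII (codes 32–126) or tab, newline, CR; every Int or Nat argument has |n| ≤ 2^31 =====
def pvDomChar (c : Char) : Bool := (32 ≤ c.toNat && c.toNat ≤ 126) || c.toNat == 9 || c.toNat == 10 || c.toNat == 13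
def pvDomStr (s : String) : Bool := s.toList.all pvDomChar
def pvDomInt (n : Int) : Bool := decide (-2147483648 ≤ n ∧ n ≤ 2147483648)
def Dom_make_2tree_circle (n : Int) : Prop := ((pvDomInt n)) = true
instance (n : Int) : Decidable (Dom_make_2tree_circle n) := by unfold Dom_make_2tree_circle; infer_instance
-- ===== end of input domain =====

-- B replaces A's extend-and-double-swap mutation by one closed-form comprehension per slot pair (objective: simpler).

-- ===== PORT A =====
-- swap(L, i, j): L[i], L[j] = L[j], L[i]; none = IndexError (never reached inside Pre_)
def pvSwap (L : List Int) (i j : Int) : Option (List Int) := do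
  let x ← PySem.List.pyGet? L j
  let y ← PySem.List.pyGet? L i
  let L1 ← PySem.List.pySet? L i x
  PySem.List.pySet? L1 j y

def make_2tree_circle (n : Int) : List Int :=
  if n < 2 then []  -- Python raises ValueError here; excluded by Pre_
  else
    match (PySem.List.pyRange 2 n 1).foldl
      (fun acc i => do
        let p ← acc
        let p ← pvSwap (p ++ [i, i]) (-3) (-2)
        pvSwap p (-4) (-3)) (some [0, 1, 0, 1]) with
    | some p => p
    | none => []  -- unreachable: the swapped indices are always in range

-- ===== PORT B =====
def make_2tree_circle_alt (n : Int) : List Int :=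
  if n < 2 then []  -- Python raises ValueError here; excluded by Pre_
  else [0, 1] ++ (PySem.List.pyRange 1 (n - 1) 1).flatMap (fun k => [k + 1, k - 1]) ++ [n - 2, n - 1]

-- ===== PRECONDITION & SPEC =====
-- Python A raises ValueError exactly when n < 2.
def Pre_make_2tree_circle (n : Int) : Prop := 2 ≤ n
instance (n : Int) : Decidable (Pre_make_2tree_circle n) := by unfold Pre_make_2tree_circle; infer_instance
def pvWitness_make_2tree_circle : Int := 4

def Spec_make_2tree_circle (n : Int) (out : List Int) : Prop := out = make_2tree_circle_alt n
instance (n : Int) (out : List Int) : Decidable (Spec_make_2tree_circle n out) := by unfold Spec_make_2tree_circle; infer_instance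

-- ===== CLAIM (what is proved, stated in full; the proofs are below) =====
def Claim_equal_make_2tree_circle : Prop := ∀ (n : Int), Dom_make_2tree_circle n → Pre_make_2tree_circle n → Spec_make_2tree_circle n (make_2tree_circle n)

-- ===== LEMMAS AND PROOFS =====

theorem pvSwap_last4 (pre : List Int) (a b c d : Int) :
    pvSwap (pre ++ [a, b, c, d]) (-3) (-2) = some (pre ++ [a, c, b, d]) := by
  unfold pvSwap
  rw [PySem.List.pyGet?_neg_ofNat _ 2 (by omega) (by simp)]
  rw [PySem.List.pyGet?_neg_ofNat _ 3 (by omega) (by simp)]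
  simp [PySem.List.pySet?, PySem.List.pyIdx?]
theorem pvSwap_last4' (pre : List Int) (a b c d : Int) :
    pvSwap (pre ++ [a, b, c, d]) (-4) (-3) = some (pre ++ [b, a, c, d]) := by
  unfold pvSwap
  rw [PySem.List.pyGet?_neg_ofNat _ 3 (by omega) (by simp)]
  rw [PySem.List.pyGet?_neg_ofNat _ 4 (by omega) (by simp)]
  simp [PySem.List.pySet?, PySem.List.pyIdx?]

theorem fold_closed (m : Int) (hm : 2 ≤ m) :
    (PySem.List.pyRange 2 m 1).foldl
      (fun acc i => do
        let p ← acc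
        let p ← pvSwap (p ++ [i, i]) (-3) (-2)
        pvSwap p (-4) (-3)) (some [0, 1, 0, 1])
    = some ([0, 1] ++ (PySem.List.pyRange 1 (m - 1) 1).flatMap (fun k => [k + 1, k - 1]) ++ [m - 2, m - 1]) := by
  induction m, hm using Int.le_induction with
  | base =>
    rw [PySem.List.pyRange_one_eq_nil (by omega), PySem.List.pyRange_one_eq_nil (by omega)]
    norm_num
  | succ m hm ih =>
    rw [PySem.List.pyRange_one_succ_right (by omega : (2:Int) ≤ m), List.foldl_append, ih]
    simp only [List.foldl_cons, List.foldl_nil, Option.bind_eq_bind, Option.bind_some]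
    have s1 : pvSwap ([0, 1] ++ (PySem.List.pyRange 1 (m - 1) 1).flatMap (fun k => [k + 1, k - 1]) ++ [m - 2, m - 1] ++ [m, m]) (-3) (-2)
        = some (([0, 1] ++ (PySem.List.pyRange 1 (m - 1) 1).flatMap (fun k => [k + 1, k - 1])) ++ [m - 2, m, m - 1, m]) := by
      rw [show [0, 1] ++ (PySem.List.pyRange 1 (m - 1) 1).flatMap (fun k => [k + 1, k - 1]) ++ [m - 2, m - 1] ++ [m, m]
          = ([0, 1] ++ (PySem.List.pyRange 1 (m - 1) 1).flatMap (fun k => [k + 1, k - 1])) ++ [m - 2, m - 1, m, m] by simp]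
      exact pvSwap_last4 _ _ _ _ _
    rw [s1, Option.bind_some, pvSwap_last4']
    rw [show m + 1 - 1 = (m - 1) + 1 by ring, PySem.List.pyRange_one_succ_right (by omega : (1:Int) ≤ m - 1)]
    simp only [List.flatMap_append, List.flatMap_cons, List.flatMap_nil, List.append_assoc, List.append_nil]
    norm_num
    and_intros <;> ring

-- ===== VERDICT (by name: the statement is the Claim_ definition above) =====
theorem make_2tree_circle_spec : Claim_equal_make_2tree_circle := by
  intro n _ hn
  unfold Pre_make_2tree_circle at hn
  unfold Spec_make_2tree_circle make_2tree_circle make_2tree_circle_alt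
  rw [if_neg (by omega), if_neg (by omega), fold_closed n hn]
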